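-- pv_equiv track=rewrite | github.com/cohbev/python-email-address-validator | EmailValidator_CohenBeveridge.py | OpenQuoteAndBracket
-- ===== SOURCE A (Python) =====
-- def UnBackslashed(string, character):
--     backslashes = 0
--     if string[character - 1] != '\\':  # Returns True straight away if the character before isn't a backslash
--         return True
--     for x in range(character):
--         if string[character - x - 1] == '\\':   # Checks every character counting backwards
--             backslashes += 1
--         else:
--             break   # If it's not a backslash the loop ends
--     return backslashes % 2 == 0  # Backslash amount must be even to be plain/literal
--
-- def OpenQuoteAndBracket(address):
--     openquote = -1
--     openbracket = -1
--     for char in range(len(address)):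
--         if UnBackslashed(address, char):  # A backslashed quote/bracket does not count
--             if address[char] == '"' and openquote == -1:
--                 openquote = char
--             if address[char] == '(' and openbracket == -1:
--                 openbracket = char
--     return openquote, openbracket
-- ===== SOURCE B (Python) =====
-- def OpenQuoteAndBracket(address):
--     openquote = -1
--     openbracket = -1
--     i = 0
--     n = len(address)
--     while i < n:
--         c = address[i]
--         if c == '\\':
--             i += 2  # skip the escaped character
--         else:
--             if c == '"' and openquote == -1:
--                 openquote = i
--             if c == '(' and openbracket == -1:
--                 openbracket = i
--             i += 1
--     return openquote, openbracket
-- ===== Notes on version B (the rewrite author's own statement) =====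
-- stated objective: simpler
-- what changed: B replaces A's per-character backward backslash-counting helper (nested loop, parity test) with a single forward scan that jumps over each escape sequence (i += 2 on a backslash), so no inner loop and no parity arithmetic remain.
import Mathlib
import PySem

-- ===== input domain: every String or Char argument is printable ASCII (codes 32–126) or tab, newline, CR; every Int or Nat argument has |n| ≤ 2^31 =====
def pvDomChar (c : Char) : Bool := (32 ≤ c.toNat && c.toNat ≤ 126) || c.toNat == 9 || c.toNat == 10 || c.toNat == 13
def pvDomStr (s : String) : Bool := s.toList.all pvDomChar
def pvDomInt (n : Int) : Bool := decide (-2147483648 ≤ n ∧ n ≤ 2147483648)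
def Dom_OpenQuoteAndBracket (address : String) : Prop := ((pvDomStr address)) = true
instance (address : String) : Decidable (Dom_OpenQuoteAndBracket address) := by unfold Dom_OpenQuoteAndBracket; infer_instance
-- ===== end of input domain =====

-- B replaces A's per-character backward backslash-counting helper with one forward scan
-- that jumps over each escape sequence; objective: simpler (and no nested loop).

-- ===== PORT A =====
-- inner 'for x in range(character): … else: break' loop of UnBackslashed
-- (the indices it reads are always in range when called from OpenQuoteAndBracket,
--  so '.getD' never supplies its default there)
def ubLoop (s : List Char) (c : Int) (x : Nat) (acc : Nat) : Nat :=
  if _h : (x : Int) < c then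
    if (PySem.List.pyGet? s (c - x - 1)).getD ' ' = '\\' then
      ubLoop s c (x + 1) (acc + 1)
    else acc
  else acc
termination_by (c - x).toNat
decreasing_by omega

def unBackslashed (s : List Char) (c : Int) : Bool :=
  if (PySem.List.pyGet? s (c - 1)).getD ' ' ≠ '\\' then true
  else (ubLoop s c 0 0) % 2 == 0

-- body of A's 'for char in range(len(address))' loop
def aStep (s : List Char) (st : Int × Int) (char : Int) : Int × Int :=
  if unBackslashed s char then
    let st1 := if (PySem.List.pyGet? s char).getD ' ' = '"' ∧ st.1 = -1 then (char, st.2) else st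
    let st2 := if (PySem.List.pyGet? s char).getD ' ' = '(' ∧ st1.2 = -1 then (st1.1, char) else st1
    st2
  else st

def OpenQuoteAndBracket (address : String) : Int × Int :=
  let s := address.toList
  (PySem.List.pyRange 0 s.length 1).foldl (aStep s) (-1, -1)

-- ===== PORT B =====
-- B's 'while i < n' forward scan, skipping the character after every backslash
def bLoop (s : List Char) (i : Nat) (st : Int × Int) : Int × Int :=
  if h : i < s.length then
    let c := s[i]
    if c = '\\' then bLoop s (i + 2) st
    else
      let st1 := if c = '"' ∧ st.1 = -1 then ((i : Int), st.2) else st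
      let st2 := if c = '(' ∧ st1.2 = -1 then (st1.1, (i : Int)) else st1
      bLoop s (i + 1) st2
  else st
termination_by s.length - i

def OpenQuoteAndBracket_alt (address : String) : Int × Int :=
  bLoop address.toList 0 (-1, -1)

-- ===== PRECONDITION & SPEC =====
def Spec_OpenQuoteAndBracket (address : String) (out : Int × Int) : Prop := out = OpenQuoteAndBracket_alt address
instance (address : String) (out : Int × Int) : Decidable (Spec_OpenQuoteAndBracket address out) := by unfold Spec_OpenQuoteAndBracket; infer_instance

-- ===== CLAIM (what is proved, stated in full; the proofs are below) =====
def Claim_equal_OpenQuoteAndBracket : Prop := ∀ (address : String), Dom_OpenQuoteAndBracket address → Spec_OpenQuoteAndBracket address (OpenQuoteAndBracket address)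

-- ===== LEMMAS AND PROOFS =====

-- length of the maximal run of backslashes ending just before index c
def runF (s : List Char) : Nat → Nat
  | 0 => 0
  | c + 1 => if s.getD c ' ' = '\\' then runF s c + 1 else 0

theorem ubLoop_acc (s : List Char) (c : Int) : ∀ x acc, ubLoop s c x (acc + 1) = ubLoop s c x acc + 1 := by
  intro x acc
  fun_induction ubLoop s c x acc with
  | case1 x acc h hc ih => rw [ubLoop, dif_pos h, if_pos hc]; exact ih
  | case2 x acc h hc => rw [ubLoop, dif_pos h, if_neg hc]
  | case3 x acc h => rw [ubLoop, dif_neg h]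

theorem ubLoop_shift (s : List Char) (c : Int) : ∀ x acc, ubLoop s (c + 1) (x + 1) acc = ubLoop s c x acc := by
  intro x acc
  fun_induction ubLoop s c x acc with
  | case1 x acc h hc ih =>
      have hx : ((x + 1 : Nat) : Int) < c + 1 := by push_cast; omega
      have hidx : c + 1 - ((x + 1 : Nat) : Int) - 1 = c - (x : Int) - 1 := by push_cast; ring
      rw [ubLoop, dif_pos hx, hidx, if_pos hc]
      exact ih
  | case2 x acc h hc =>
      have hx : ((x + 1 : Nat) : Int) < c + 1 := by push_cast; omega
      have hidx : c + 1 - ((x + 1 : Nat) : Int) - 1 = c - (x : Int) - 1 := by push_cast; ring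
      rw [ubLoop, dif_pos hx, hidx, if_neg hc]
  | case3 x acc h =>
      have hx : ¬ ((x + 1 : Nat) : Int) < c + 1 := by push_cast; omega
      rw [ubLoop, dif_neg hx]

theorem ubLoop_eq_runF (s : List Char) : ∀ c : Nat, c ≤ s.length → ubLoop s (c : Int) 0 0 = runF s c := by
  intro c
  induction c with
  | zero =>
      intro _
      rw [ubLoop, dif_neg (by norm_num)]
      rfl
  | succ c ih =>
      intro hc
      have hlt : c < s.length := by omega
      have hx : ((0 : Nat) : Int) < ((c + 1 : Nat) : Int) := by push_cast; omega
      have hidx : ((c + 1 : Nat) : Int) - ((0 : Nat) : Int) - 1 = (c : Int) := by push_cast; ring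
      have hget : (PySem.List.pyGet? s ((c : Nat) : Int)).getD ' ' = s.getD c ' ' := by
        rw [PySem.List.pyGet?_natCast]
        simp [List.getD, hlt]
      rw [ubLoop, dif_pos hx, hidx, hget]
      rw [runF]
      by_cases hb : s.getD c ' ' = '\\'
      · rw [if_pos hb, if_pos hb]
        have : ((c + 1 : Nat) : Int) = (c : Int) + 1 := by push_cast; ring
        rw [this, ubLoop_shift s (c : Int) 0 (0 + 1), ubLoop_acc s (c : Int) 0 0, ih (by omega)]
      · rw [if_neg hb, if_neg hb]

theorem unBackslashed_eq (s : List Char) (c : Nat) (hc : c ≤ s.length) :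
    unBackslashed s (c : Int) = (runF s c % 2 == 0) := by
  cases c with
  | zero =>
      have hub : ubLoop s ((0 : Nat) : Int) 0 0 = 0 := by
        rw [ubLoop, dif_neg (by norm_num)]
      unfold unBackslashed
      split
      · simp [runF]
      · rw [hub]; simp [runF]
  | succ c =>
      have hlt : c < s.length := by omega
      have hidx : ((c + 1 : Nat) : Int) - 1 = ((c : Nat) : Int) := by push_cast; ring
      have hget : (PySem.List.pyGet? s ((c : Nat) : Int)).getD ' ' = s.getD c ' ' := by
        rw [PySem.List.pyGet?_natCast]
        simp [List.getD, hlt]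
      unfold unBackslashed
      rw [hidx, hget]
      by_cases hb : s.getD c ' ' = '\\'
      · rw [if_neg (by simpa [List.getD] using hb), ubLoop_eq_runF s (c + 1) hc]
      · rw [if_pos (by simpa [List.getD] using hb)]
        rw [runF, if_neg hb]
        rfl

theorem main_lemma (s : List Char) : ∀ k i st, s.length - i = k → runF s i % 2 = 0 →
    (List.range' i (s.length - i)).foldl (fun st (j : Nat) => aStep s st (j : Int)) st = bLoop s i st := by
  intro k
  induction k using Nat.strong_induction_on with
  | _ k ihk =>
    intro i st hk hpar
    by_cases h : i < s.length
    · have hub : unBackslashed s (i : Int) = true := by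
        rw [unBackslashed_eq s i (le_of_lt h)]
        simp [hpar]
      have hget : s[i]?.getD ' ' = s[i] := by
        rw [List.getElem?_eq_getElem h]
        rfl
      have hgd : s.getD i ' ' = s[i] := List.getD_eq_getElem s ' ' h
      by_cases hb : s[i] = '\\'
      · have hrun1 : runF s (i + 1) = runF s i + 1 := by
          rw [runF, if_pos (by rw [hgd]; exact hb)]
        have hstepi : aStep s st ((i : Nat) : Int) = st := by
          simp [aStep, hub, hget, hb]
          
        by_cases h1 : i + 1 < s.length
        · have e : s.length - i = (s.length - (i + 2)) + 1 + 1 := by omega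
          have hub1 : unBackslashed s ((i + 1 : Nat) : Int) = false := by
            rw [unBackslashed_eq s (i + 1) (by omega)]
            simp [hrun1]
            omega
          have hstep1 : ∀ t : Int × Int, aStep s t ((i + 1 : Nat) : Int) = t := by
            intro t
            simp only [aStep, hub1]
            simp
          have hpar2 : runF s (i + 2) % 2 = 0 := by
            have : i + 2 = (i + 1) + 1 := by omega
            rw [this, runF]
            split <;> omega
          rw [e, List.range'_succ, List.foldl_cons, List.range'_succ, List.foldl_cons]
          rw [hstepi, hstep1]
          conv_rhs => rw [bLoop]
          simp only [dif_pos h]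
          rw [if_pos hb]
          exact ihk (s.length - (i + 2)) (by omega) (i + 2) st rfl hpar2
        · have e : s.length - i = 1 := by omega
          rw [e]
          have : List.range' i 1 = [i] := by simp
          rw [this, List.foldl_cons, hstepi, List.foldl_nil]
          conv_rhs => rw [bLoop]
          simp only [dif_pos h]
          rw [if_pos hb, bLoop, dif_neg (by omega)]
      · have hpar1 : runF s (i + 1) % 2 = 0 := by
          rw [runF, if_neg (by rw [hgd]; exact hb)]
        have e : s.length - i = (s.length - (i + 1)) + 1 := by omega
        rw [e, List.range'_succ, List.foldl_cons]
        conv_rhs => rw [bLoop]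
        simp only [dif_pos h]
        rw [if_neg hb]
        rw [ihk (s.length - (i + 1)) (by omega) (i + 1) (aStep s st ((i : Nat) : Int)) rfl hpar1]
        congr 1
        simp [aStep, hub, hget]
    · have e : s.length - i = 0 := by omega
      rw [e]
      conv_rhs => rw [bLoop]
      rw [dif_neg h]
      rfl

-- ===== VERDICT (by name: the statement is the Claim_ definition above) =====
theorem OpenQuoteAndBracket_spec : Claim_equal_OpenQuoteAndBracket := by
  intro address _
  unfold Spec_OpenQuoteAndBracket OpenQuoteAndBracket OpenQuoteAndBracket_alt
  simp only []
  rw [PySem.List.pyRange_one, List.foldl_map]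
  have hn : ((address.toList.length : Int) - 0).toNat = address.toList.length := by omega
  rw [hn, List.range_eq_range']
  simp only [zero_add]
  have h := main_lemma address.toList (address.toList.length - 0) 0 (-1, -1) rfl rfl
  rw [Nat.sub_zero] at h
  exact h
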